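-- pv_equiv track=rewrite | github.com/Thawat09/Inno | robot/app/utils/extract_utils.py | extract_multiline_after_label
-- ===== SOURCE A (Python) =====
-- def extract_multiline_after_label(lines, label, stop_labels, section_headers):
--     label_lower = label.lower()
--     for i, line in enumerate(lines):
--         if line.lower().startswith(label_lower):
--             first = line[len(label):].strip()
--             collected = []
--             if first:
--                 collected.append(first)
--
--             j = i + 1
--             while j < len(lines):
--                 current = lines[j].strip()
--                 current_lower = current.lower()
--
--                 if any(current_lower.startswith(s.lower()) for s in stop_labels):
--                     break
--
--                 if current_lower in section_headers.values():
--                     break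
--
--                 collected.append(current)
--                 j += 1
--
--             text = "\n".join([x for x in collected if x.strip()])
--             return text if text else None
--     return None
-- ===== SOURCE B (Python) =====
-- def extract_multiline_after_label(lines, label, stop_labels, section_headers):
--     # single forward pass with an explicit state machine; the result text is
--     # joined incrementally instead of collecting a list and joining at the end
--     SEARCH, COLLECT, DONE = 0, 1, 2
--     low = label.lower()
--     state = SEARCH
--     text = None
--     for line in lines:
--         if state == SEARCH:
--             if line.lower().startswith(low):
--                 state = COLLECT
--                 first = line[len(label):].strip()
--                 if first:
--                     text = first
--         elif state == COLLECT:
--             cur = line.strip()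
--             cl = cur.lower()
--             if any(cl.startswith(s.lower()) for s in stop_labels) or cl in section_headers.values():
--                 state = DONE
--             elif cur:
--                 if text is None:
--                     text = cur
--                 else:
--                     text += "\n" + cur
--     return text if state != SEARCH else None
-- ===== Notes on version B (the rewrite author's own statement) =====
-- stated objective: alternative
-- what changed: A nests an inner while-loop (with breaks) inside an enumerate loop, collects a list and joins/filters it at the end; B is a single forward pass driven by an explicit three-state machine (SEARCH/COLLECT/DONE) that never breaks and builds the joined result text incrementally, with no collected list, no final filter and no final join.
import Mathlib
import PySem

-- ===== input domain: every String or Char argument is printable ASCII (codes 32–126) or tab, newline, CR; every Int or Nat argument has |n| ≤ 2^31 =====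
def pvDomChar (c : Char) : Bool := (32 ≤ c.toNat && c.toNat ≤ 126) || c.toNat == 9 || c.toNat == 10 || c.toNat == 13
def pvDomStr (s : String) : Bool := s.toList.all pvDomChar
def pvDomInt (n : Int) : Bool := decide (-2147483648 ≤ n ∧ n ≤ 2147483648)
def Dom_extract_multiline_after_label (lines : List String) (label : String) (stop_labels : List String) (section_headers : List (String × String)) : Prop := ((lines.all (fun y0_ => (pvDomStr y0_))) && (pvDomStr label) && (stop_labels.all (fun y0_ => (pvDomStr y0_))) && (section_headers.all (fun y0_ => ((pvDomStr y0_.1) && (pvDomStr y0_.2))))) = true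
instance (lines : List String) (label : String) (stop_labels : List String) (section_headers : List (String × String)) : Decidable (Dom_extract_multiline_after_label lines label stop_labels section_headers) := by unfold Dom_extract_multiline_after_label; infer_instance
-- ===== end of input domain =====

-- B replaces A's nested enumerate/while loops (collect list, then filter+join) by one
-- forward pass with an explicit SEARCH/COLLECT/DONE state machine that joins the result
-- text incrementally (objective: alternative decomposition, same cost).

-- ===== PORT A =====
-- the inner `while j < len(lines)` loop of A, over the remaining lines, carrying `collected`
def pvA_while (stop_labels : List String) (section_headers : List (String × String)) : List String → List String → List String
  | [], collected => collected
  | l :: tl, collected =>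
    let current := PySem.Str.strip l
    let current_lower := PySem.Str.lower current
    if stop_labels.any (fun s => PySem.Str.startswith current_lower (PySem.Str.lower s)) then collected
    else if ((PySem.Dict.ofList section_headers).values).contains current_lower then collected
    else pvA_while stop_labels section_headers tl (collected ++ [current])

-- the outer `for i, line in enumerate(lines)` loop of A
def pvA_outer (label : String) (label_lower : String) (stop_labels : List String) (section_headers : List (String × String)) : List String → Option String
  | [] => none
  | line :: rest =>
    if PySem.Str.startswith (PySem.Str.lower line) label_lower then
      let first := PySem.Str.strip (PySem.Str.slice line (some (PySem.Str.len label)) none)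
      let collected0 : List String := if first ≠ "" then [first] else []
      let collected := pvA_while stop_labels section_headers rest collected0
      let text := PySem.Str.join "\n" (collected.filter (fun x => PySem.Str.strip x ≠ ""))
      if text ≠ "" then some text else none
    else pvA_outer label label_lower stop_labels section_headers rest

def extract_multiline_after_label (lines : List String) (label : String) (stop_labels : List String) (section_headers : List (String × String)) : Option String :=
  pvA_outer label (PySem.Str.lower label) stop_labels section_headers lines

-- ===== PORT B =====
-- one step of B's state machine: state 0 = SEARCH, 1 = COLLECT, 2 = DONE; the pair is (state, text)
def pvB_step (label : String) (label_lower : String) (stop_labels : List String) (section_headers : List (String × String)) (st : Nat × Option String) (line : String) : Nat × Option String :=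
  if st.1 == 0 then
    (if PySem.Str.startswith (PySem.Str.lower line) label_lower then
      let first := PySem.Str.strip (PySem.Str.slice line (some (PySem.Str.len label)) none)
      (1, if first ≠ "" then some first else st.2)
    else st)
  else if st.1 == 1 then
    (let cur := PySem.Str.strip line
     let cl := PySem.Str.lower cur
     if stop_labels.any (fun s => PySem.Str.startswith cl (PySem.Str.lower s)) || ((PySem.Dict.ofList section_headers).values).contains cl then
       (2, st.2)
     else if cur ≠ "" then
       (1, some (match st.2 with | none => cur | some t => t ++ ("\n" ++ cur)))
     else st)
  else st

def extract_multiline_after_label_alt (lines : List String) (label : String) (stop_labels : List String) (section_headers : List (String × String)) : Option String :=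
  let low := PySem.Str.lower label
  let r := lines.foldl (pvB_step label low stop_labels section_headers) (0, none)
  if r.1 ≠ 0 then r.2 else none

-- ===== PRECONDITION & SPEC =====
def Spec_extract_multiline_after_label (lines : List String) (label : String) (stop_labels : List String) (section_headers : List (String × String)) (out : Option String) : Prop := out = extract_multiline_after_label_alt lines label stop_labels section_headers
instance (lines : List String) (label : String) (stop_labels : List String) (section_headers : List (String × String)) (out : Option String) : Decidable (Spec_extract_multiline_after_label lines label stop_labels section_headers out) := by unfold Spec_extract_multiline_after_label; infer_instance

-- ===== CLAIM (what is proved, stated in full; the proofs are below) =====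
def Claim_equal_extract_multiline_after_label : Prop := ∀ (lines : List String) (label : String) (stop_labels : List String) (section_headers : List (String × String)), Dom_extract_multiline_after_label lines label stop_labels section_headers → Spec_extract_multiline_after_label lines label stop_labels section_headers (extract_multiline_after_label lines label stop_labels section_headers)

-- ===== LEMMAS AND PROOFS =====

-- proof-side helper: the first stopping index in a tail (defaults to its length)
def pvB_findEnd (stops : List String) (headers : List String) : List String → Nat → Nat
  | [], j => j
  | l :: tl, j =>
    let cl := PySem.Str.lower (PySem.Str.strip l)
    if stops.any (fun s => PySem.Str.startswith cl s) || headers.contains cl then j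
    else pvB_findEnd stops headers tl (j + 1)

-- proof-side helper: B's incremental accumulation of the result text on one stripped line
def pvJAcc (t : Option String) (c : String) : Option String :=
  if c ≠ "" then some (match t with | none => c | some x => x ++ ("\n" ++ c)) else t

-- counter shift for the end-finding helper
theorem pvB_findEnd_shift (stops headers : List String) (l : List String) (j : Nat) :
    pvB_findEnd stops headers l j = j + pvB_findEnd stops headers l 0 := by
  induction l generalizing j with
  | nil => simp [pvB_findEnd]
  | cons a tl ih =>
    simp only [pvB_findEnd]
    split
    · simp
    · rw [ih (j + 1), ih 1]; omega

-- A's inner while-loop collects exactly the stripped prefix up to the end index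
theorem pvA_while_eq_take (stop_labels : List String) (section_headers : List (String × String)) (rest : List String) (c : List String) :
    pvA_while stop_labels section_headers rest c =
      c ++ (rest.take (pvB_findEnd (stop_labels.map PySem.Str.lower) ((PySem.Dict.ofList section_headers).values) rest 0)).map PySem.Str.strip := by
  induction rest generalizing c with
  | nil => simp [pvA_while, pvB_findEnd]
  | cons l tl ih =>
    simp only [pvA_while, pvB_findEnd, List.any_map, Function.comp_def]
    cases hb1 : stop_labels.any (fun s => PySem.Str.startswith (PySem.Str.lower (PySem.Str.strip l)) (PySem.Str.lower s)) with
    | true => simp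
    | false =>
      cases hb2 : ((PySem.Dict.ofList section_headers).values).contains (PySem.Str.lower (PySem.Str.strip l)) with
      | true => simp
      | false =>
        simp only [Bool.false_or, Bool.false_eq_true, if_false]
        rw [ih, pvB_findEnd_shift _ _ tl 1, Nat.add_comm]
        simp [List.append_assoc]

-- the DONE state absorbs the rest of the fold
theorem pv_fold_done (label : String) (label_lower : String) (stop_labels : List String) (section_headers : List (String × String)) (t : Option String) (l : List String) :
    l.foldl (pvB_step label label_lower stop_labels section_headers) (2, t) = (2, t) := by
  induction l with
  | nil => rfl
  | cons a tl ih => simpa [pvB_step] using ih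

-- one COLLECT step is a pvJAcc update (when not stopping)
theorem pv_step_collect (label : String) (label_lower : String) (stop_labels : List String) (section_headers : List (String × String)) (t : Option String) (l : String)
    (h : (stop_labels.any (fun s => PySem.Str.startswith (PySem.Str.lower (PySem.Str.strip l)) (PySem.Str.lower s)) || ((PySem.Dict.ofList section_headers).values).contains (PySem.Str.lower (PySem.Str.strip l))) = false) :
    pvB_step label label_lower stop_labels section_headers (1, t) l = (1, pvJAcc t (PySem.Str.strip l)) := by
  have h1 : pvB_step label label_lower stop_labels section_headers (1, t) l =
      (if (stop_labels.any (fun s => PySem.Str.startswith (PySem.Str.lower (PySem.Str.strip l)) (PySem.Str.lower s)) || ((PySem.Dict.ofList section_headers).values).contains (PySem.Str.lower (PySem.Str.strip l))) then (2, t)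
       else if PySem.Str.strip l ≠ "" then
         (1, some (match t with | none => PySem.Str.strip l | some x => x ++ ("\n" ++ PySem.Str.strip l)))
       else (1, t)) := rfl
  rw [h1, h]
  by_cases hc : PySem.Str.strip l = ""
  · simp only [Bool.false_eq_true, if_false, pvJAcc]
    simp [hc]
  · simp only [Bool.false_eq_true, if_false, pvJAcc]
    simp [hc]

-- the COLLECT phase of the fold: state stays nonzero and the text is the pvJAcc fold of the stripped prefix
theorem pv_fold_collect (label : String) (label_lower : String) (stop_labels : List String) (section_headers : List (String × String)) (rest : List String) (t : Option String) :
    rest.foldl (pvB_step label label_lower stop_labels section_headers) (1, t) =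
      ((rest.foldl (pvB_step label label_lower stop_labels section_headers) (1, t)).1,
       ((rest.take (pvB_findEnd (stop_labels.map PySem.Str.lower) ((PySem.Dict.ofList section_headers).values) rest 0)).map PySem.Str.strip).foldl pvJAcc t) ∧
    (rest.foldl (pvB_step label label_lower stop_labels section_headers) (1, t)).1 ≠ 0 := by
  induction rest generalizing t with
  | nil => simp [pvB_findEnd]
  | cons l tl ih =>
    simp only [List.foldl_cons, pvB_findEnd, List.any_map, Function.comp_def]
    cases hb : (stop_labels.any (fun s => PySem.Str.startswith (PySem.Str.lower (PySem.Str.strip l)) (PySem.Str.lower s)) || ((PySem.Dict.ofList section_headers).values).contains (PySem.Str.lower (PySem.Str.strip l))) with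
    | true =>
      have h1 : pvB_step label label_lower stop_labels section_headers (1, t) l =
          (if (stop_labels.any (fun s => PySem.Str.startswith (PySem.Str.lower (PySem.Str.strip l)) (PySem.Str.lower s)) || ((PySem.Dict.ofList section_headers).values).contains (PySem.Str.lower (PySem.Str.strip l))) then (2, t)
           else if PySem.Str.strip l ≠ "" then
             (1, some (match t with | none => PySem.Str.strip l | some x => x ++ ("\n" ++ PySem.Str.strip l)))
           else (1, t)) := rfl
      have hstep : pvB_step label label_lower stop_labels section_headers (1, t) l = (2, t) := by
        rw [h1, hb]; simp
      rw [hstep, pv_fold_done]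
      simp
    | false =>
      rw [pv_step_collect label label_lower stop_labels section_headers t l hb]
      have := ih (pvJAcc t (PySem.Str.strip l))
      refine ⟨?_, this.2⟩
      rw [this.1]
      simp only [Bool.false_eq_true, if_false]
      rw [pvB_findEnd_shift _ _ tl 1, Nat.add_comm, List.take_succ_cons, List.map_cons, List.foldl_cons]

-- ASCII strip is idempotent (head of a dropWhile fails the predicate; rstrip is a prefix)
theorem pv_dropWhile_idem {α : Type} (p : α → Bool) (l : List α) :
    List.dropWhile p (List.dropWhile p l) = List.dropWhile p l := by
  induction l with
  | nil => rfl
  | cons a tl ih =>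
    by_cases h : p a <;> simp [h, ih]

theorem pv_dropWhile_head {α : Type} (p : α → Bool) (l : List α) (b : α) (t : List α)
    (h : List.dropWhile p l = b :: t) : p b = false := by
  induction l with
  | nil => simp at h
  | cons a tl ih =>
    by_cases ha : p a
    · exact ih (by simpa [List.dropWhile_cons, ha] using h)
    · simp [ha] at h
      cases h.1; simpa using ha

theorem pv_lstrip_rstrip_lstrip (s : List Char) :
    PySem.Chars.lstrip (PySem.Chars.rstrip (PySem.Chars.lstrip s)) = PySem.Chars.rstrip (PySem.Chars.lstrip s) := by
  cases hr : PySem.Chars.rstrip (PySem.Chars.lstrip s) with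
  | nil => rfl
  | cons b t =>
    -- rstrip y is a prefix of y, so b is the head of lstrip s, hence not a space
    have hpre : (b :: t) <+: PySem.Chars.lstrip s := by
      rw [← hr]
      unfold PySem.Chars.rstrip
      have := List.dropWhile_suffix (l := (PySem.Chars.lstrip s).reverse) (p := PySem.Chars.isspace)
      rw [← List.reverse_prefix] at this
      simpa using this
    obtain ⟨u, hu⟩ := hpre
    have hb : PySem.Chars.isspace b = false := pv_dropWhile_head _ s b (t ++ u) hu.symm
    simp [PySem.Chars.lstrip, hb]

theorem pv_rstrip_idem (y : List Char) : PySem.Chars.rstrip (PySem.Chars.rstrip y) = PySem.Chars.rstrip y := by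
  unfold PySem.Chars.rstrip
  rw [List.reverse_reverse, pv_dropWhile_idem]

theorem pv_strip_idem (s : List Char) : PySem.Chars.strip (PySem.Chars.strip s) = PySem.Chars.strip s := by
  unfold PySem.Chars.strip
  rw [pv_lstrip_rstrip_lstrip, pv_rstrip_idem]

theorem pv_strip_idem_str (x : String) : PySem.Str.strip (PySem.Str.strip x) = PySem.Str.strip x := by
  unfold PySem.Str.strip
  rw [show (String.ofList (PySem.Chars.strip x.toList)).toList = PySem.Chars.strip x.toList by simp,
    pv_strip_idem]

-- join over a cons absorbs an appended "sep ++ piece" into the head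
theorem pv_join_singleton (a : String) : PySem.Str.join "\n" [a] = a := by
  unfold PySem.Str.join
  rw [List.map_cons, List.map_nil, PySem.Chars.join_singleton]
  simp

theorem pv_join_cons (a c : String) (rest : List String) :
    PySem.Str.join "\n" ((a ++ ("\n" ++ c)) :: rest) = PySem.Str.join "\n" (a :: c :: rest) := by
  unfold PySem.Str.join
  congr 1
  cases rest with
  | nil =>
    simp only [List.map_cons, List.map_nil, PySem.Chars.join_cons_cons, PySem.Chars.join_singleton]
    simp
  | cons m ms =>
    simp only [List.map_cons, PySem.Chars.join_cons_cons]
    simp [List.append_assoc]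

-- the pvJAcc fold computes "join of the non-empty entries" (accumulator form)
theorem pv_fold_jacc_some (ws : List String) (a : String) :
    ws.foldl pvJAcc (some a) = some (PySem.Str.join "\n" (a :: ws.filter (fun x => x ≠ ""))) := by
  induction ws generalizing a with
  | nil => simp [pv_join_singleton]
  | cons c t ih =>
    by_cases hc : c = ""
    · simp [pvJAcc, hc, ih]
    · simp only [List.foldl_cons, pvJAcc, hc, ne_eq, not_false_iff, if_true]
      rw [ih (a ++ ("\n" ++ c))]
      simp [hc, pv_join_cons]

theorem pv_fold_jacc_none (ws : List String) :
    ws.foldl pvJAcc none =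
      (if ws.filter (fun x => x ≠ "") = [] then none
       else some (PySem.Str.join "\n" (ws.filter (fun x => x ≠ "")))) := by
  induction ws with
  | nil => simp
  | cons c t ih =>
    by_cases hc : c = ""
    · simp [pvJAcc, hc, ih]
    · simp only [List.foldl_cons, pvJAcc, hc, ne_eq, not_false_iff, if_true]
      rw [pv_fold_jacc_some]
      simp [hc]

-- "\n".join of a non-empty list headed by a non-empty string is non-empty
theorem pv_join_ne_empty (x : String) (xs : List String) (hx : x ≠ "") :
    PySem.Str.join "\n" (x :: xs) ≠ "" := by
  intro h
  have h' : (PySem.Str.join "\n" (x :: xs)).toList = [] := by rw [h]; rfl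
  rw [PySem.Str.toList_join] at h'
  cases xs with
  | nil =>
    simp only [List.map_cons, List.map_nil] at h'
    rw [PySem.Chars.join_singleton] at h'
    exact hx (String.toList_eq_nil_iff.mp h')
  | cons y ys =>
    simp only [List.map_cons] at h'
    rw [PySem.Chars.join_cons_cons] at h'
    simp [show ("\n" : String).toList = ['\n'] from rfl] at h'

-- A's tail: filter + join + emptiness test, in the same shape as pv_fold_jacc_none
theorem pv_a_tail (collected : List String) (hs : ∀ x ∈ collected, PySem.Str.strip x = x) :
    (if PySem.Str.join "\n" (collected.filter (fun x => PySem.Str.strip x ≠ "")) ≠ "" then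
       some (PySem.Str.join "\n" (collected.filter (fun x => PySem.Str.strip x ≠ ""))) else none) =
      (if collected.filter (fun x => x ≠ "") = [] then none
       else some (PySem.Str.join "\n" (collected.filter (fun x => x ≠ "")))) := by
  have hf : collected.filter (fun x => decide (PySem.Str.strip x ≠ "")) = collected.filter (fun x => decide (x ≠ "")) := by
    apply List.filter_congr
    intro x hx
    rw [hs x hx]
  simp only [ne_eq, hf]
  cases hout : collected.filter (fun x => decide (¬x = "")) with
  | nil => simp [show PySem.Str.join "\n" [] = "" from rfl]
  | cons o os =>
    have ho : o ≠ "" := by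
      have : o ∈ collected.filter (fun x => decide (¬x = "")) := by rw [hout]; exact List.mem_cons_self
      simpa using List.of_mem_filter this
    simp [pv_join_ne_empty o os ho]

-- the core: A's outer loop equals B's whole fold
set_option maxHeartbeats 1600000 in
theorem pv_outer_eq (label : String) (stop_labels : List String) (section_headers : List (String × String)) (lines : List String) :
    pvA_outer label (PySem.Str.lower label) stop_labels section_headers lines =
      extract_multiline_after_label_alt lines label stop_labels section_headers := by
  induction lines with
  | nil => rfl
  | cons line rest ih =>
    by_cases hm : PySem.Str.startswith (PySem.Str.lower line) (PySem.Str.lower label) = true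
    · -- first matching line: B enters COLLECT here
      simp only [pvA_outer, hm, if_true, extract_multiline_after_label_alt, List.foldl_cons]
      have h1 : pvB_step label (PySem.Str.lower label) stop_labels section_headers (0, none) line =
          (if PySem.Str.startswith (PySem.Str.lower line) (PySem.Str.lower label) then
            (1, if PySem.Str.strip (PySem.Str.slice line (some (PySem.Str.len label)) none) ≠ "" then
                  some (PySem.Str.strip (PySem.Str.slice line (some (PySem.Str.len label)) none)) else none)
           else (0, none)) := rfl
      have hstep : pvB_step label (PySem.Str.lower label) stop_labels section_headers (0, none) line =
          (1, if PySem.Str.strip (PySem.Str.slice line (some (PySem.Str.len label)) none) ≠ "" then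
                some (PySem.Str.strip (PySem.Str.slice line (some (PySem.Str.len label)) none)) else none) := by
        rw [h1, if_pos hm]
      rw [hstep]
      set first := PySem.Str.strip (PySem.Str.slice line (some (PySem.Str.len label)) none) with hfirst
      set t0 : Option String := if first ≠ "" then some first else none with ht0
      obtain ⟨hfold, hne⟩ := pv_fold_collect label (PySem.Str.lower label) stop_labels section_headers rest t0
      rw [pvA_while_eq_take]
      set ws := (rest.take (pvB_findEnd (stop_labels.map PySem.Str.lower) ((PySem.Dict.ofList section_headers).values) rest 0)).map PySem.Str.strip with hws
      set c0 : List String := if first ≠ "" then [first] else [] with hc0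
      -- B's result text
      have hb2 : (rest.foldl (pvB_step label (PySem.Str.lower label) stop_labels section_headers) (1, t0)).2 = ws.foldl pvJAcc t0 := by
        conv_lhs => rw [hfold]
      have hres : (if (rest.foldl (pvB_step label (PySem.Str.lower label) stop_labels section_headers) (1, t0)).1 ≠ 0 then
            (rest.foldl (pvB_step label (PySem.Str.lower label) stop_labels section_headers) (1, t0)).2 else none) = ws.foldl pvJAcc t0 := by
        rw [if_pos hne, hb2]
      rw [hres]
      -- fold from t0 = fold from none over c0 ++ ws
      have hc0fold : ws.foldl pvJAcc t0 = (c0 ++ ws).foldl pvJAcc none := by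
        by_cases hf : first = ""
        · simp [ht0, hc0, hf]
        · simp [ht0, hc0, hf, List.foldl_cons, pvJAcc]
      rw [hc0fold, pv_fold_jacc_none]
      -- A's side: every collected entry is already stripped
      have hstripped : ∀ x ∈ c0 ++ ws, PySem.Str.strip x = x := by
        intro x hx
        rcases List.mem_append.mp hx with hx | hx
        · have : x = first := by
            by_cases hf : first = "" <;> simp [hc0, hf] at hx
            exact hx
          rw [this, hfirst]; exact pv_strip_idem_str _
        · obtain ⟨y, _, hy⟩ := List.mem_map.mp hx
          rw [← hy]; exact pv_strip_idem_str _
      exact pv_a_tail (c0 ++ ws) hstripped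
    · simp only [pvA_outer, hm]
      rw [ih]
      simp only [extract_multiline_after_label_alt, List.foldl_cons]
      have h1 : pvB_step label (PySem.Str.lower label) stop_labels section_headers (0, none) line =
          (if PySem.Str.startswith (PySem.Str.lower line) (PySem.Str.lower label) then
            (1, if PySem.Str.strip (PySem.Str.slice line (some (PySem.Str.len label)) none) ≠ "" then
                  some (PySem.Str.strip (PySem.Str.slice line (some (PySem.Str.len label)) none)) else none)
           else (0, none)) := rfl
      have hstep : pvB_step label (PySem.Str.lower label) stop_labels section_headers (0, none) line = (0, none) := by
        rw [h1, if_neg hm]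
      rw [hstep]
      simp

-- ===== VERDICT (by name: the statement is the Claim_ definition above) =====
theorem extract_multiline_after_label_spec : Claim_equal_extract_multiline_after_label := by
  intro lines label stop_labels section_headers _
  unfold Spec_extract_multiline_after_label extract_multiline_after_label
  exact pv_outer_eq label stop_labels section_headers lines
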